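-- pv_equiv track=rewrite | github.com/Pouf/CodingCompetition | CiO/letter-queue.py | letter_queue
-- ===== SOURCE A (Python) =====
-- def letter_queue(commands):
--     queue = []
--     for command in commands:
--         if command == 'POP':
--             queue = queue[1:] or []
--         else:
--             queue += [command[-1]]
--     return ''.join(queue)
-- ===== SOURCE B (Python) =====
-- def letter_queue(commands):
--     size = 0
--     for command in commands:
--         if command == 'POP':
--             if size:
--                 size -= 1
--         else:
--             size += 1
--     letters = [command[-1] for command in commands if command != 'POP']
--     return ''.join(letters[len(letters) - size:])
-- ===== Notes on version B (the rewrite author's own statement) =====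
-- stated objective: alternative
-- what changed: Instead of simulating the queue with repeated slice-copies queue[1:], B runs two staged passes: first a saturating counter computing the final queue size, then a comprehension collecting all letters, returning the last size letters.
import Mathlib
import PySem

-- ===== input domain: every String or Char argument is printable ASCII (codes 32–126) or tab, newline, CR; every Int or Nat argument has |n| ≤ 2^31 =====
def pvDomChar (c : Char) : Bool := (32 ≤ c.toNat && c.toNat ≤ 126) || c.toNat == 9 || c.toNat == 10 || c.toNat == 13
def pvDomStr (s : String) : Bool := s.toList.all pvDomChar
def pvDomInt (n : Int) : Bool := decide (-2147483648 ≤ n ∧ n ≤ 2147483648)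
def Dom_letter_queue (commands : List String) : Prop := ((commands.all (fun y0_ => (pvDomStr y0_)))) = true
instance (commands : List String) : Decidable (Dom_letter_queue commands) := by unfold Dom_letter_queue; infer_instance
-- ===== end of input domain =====

-- B replaces A's queue simulation (repeated slice-copies queue[1:]) by two staged passes:
-- a saturating counter computing the final queue size, then collecting all letters and
-- keeping the last `size` of them (alternative decomposition; no speed claim is made).

-- command[-1] (both Pythons index the last character this way)
def lqLast (command : String) : Char := (PySem.Str.pyGet? command (-1)).getD ' '

-- ===== PORT A =====
-- step of A's loop: POP drops the front ('queue[1:] or []' = drop 1), otherwise append command[-1]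
def letterQueueStepA (queue : List Char) (command : String) : List Char :=
  if command = "POP" then queue.drop 1
  else queue ++ [lqLast command]

def letter_queue (commands : List String) : String :=
  String.mk (commands.foldl letterQueueStepA [])

-- ===== PORT B =====
-- pass 1 of B: the saturating size counter ('if size: size -= 1')
def letterQueueSize (size : Nat) (command : String) : Nat :=
  if command = "POP" then (if size ≠ 0 then size - 1 else size)
  else size + 1

def letter_queue_alt (commands : List String) : String :=
  let size := commands.foldl letterQueueSize 0
  let letters := (commands.filter (fun c => c ≠ "POP")).map lqLast
  String.mk (letters.drop (letters.length - size))

-- ===== PRECONDITION & SPEC =====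
-- Pre_ excludes lists containing the empty string: there A raises IndexError on command[-1] (and so does B).
def Pre_letter_queue (commands : List String) : Prop := ∀ c ∈ commands, c ≠ ""
instance (commands : List String) : Decidable (Pre_letter_queue commands) := by unfold Pre_letter_queue; infer_instance

def pvWitness_letter_queue : List String := ["Xa", "Xb", "POP", "z"]

def Spec_letter_queue (commands : List String) (out : String) : Prop := out = letter_queue_alt commands
instance (commands : List String) (out : String) : Decidable (Spec_letter_queue commands out) := by unfold Spec_letter_queue; infer_instance

-- ===== CLAIM (what is proved, stated in full; the proofs are below) =====
def Claim_equal_letter_queue : Prop := ∀ (commands : List String), Dom_letter_queue commands → Pre_letter_queue commands → Spec_letter_queue commands (letter_queue commands)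

-- ===== LEMMAS AND PROOFS =====

-- the letters collected from cs
def lqL (cs : List String) : List Char := (cs.filter (fun c => c ≠ "POP")).map lqLast

-- the size counter never exceeds its start plus the number of letters seen
theorem lq_size_le (cs : List String) : ∀ n : Nat,
    cs.foldl letterQueueSize n ≤ n + (lqL cs).length := by
  induction cs with
  | nil => intro n; simp [lqL]
  | cons c cs ih =>
    intro n
    by_cases hc : c = "POP"
    · have hL : lqL (c :: cs) = lqL cs := by simp [lqL, hc]
      rw [hL]
      simp only [List.foldl_cons, letterQueueSize, hc, reduceIte]
      have h2 := ih (if n ≠ 0 then n - 1 else n)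
      have h1 : (if n ≠ 0 then n - 1 else n) ≤ n := by split <;> omega
      omega
    · have hL : lqL (c :: cs) = lqLast c :: lqL cs := by simp [lqL, hc]
      rw [hL]
      simp only [List.foldl_cons, letterQueueSize, if_neg hc, List.length_cons]
      have h2 := ih (n + 1)
      omega

-- invariant: A's queue equals (start-queue ++ letters) minus the first (total − size) entries
theorem lq_invariant (cs : List String) : ∀ (q : List Char),
    cs.foldl letterQueueStepA q =
      (q ++ lqL cs).drop ((q.length + (lqL cs).length) - cs.foldl letterQueueSize q.length) := by
  induction cs with
  | nil => intro q; simp [lqL]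
  | cons c cs ih =>
    intro q
    simp only [List.foldl_cons, letterQueueStepA, letterQueueSize]
    by_cases hc : c = "POP"
    · simp only [hc, reduceIte]
      have hL : lqL ("POP" :: cs) = lqL cs := by simp [lqL]
      rw [hL]
      rcases q with _ | ⟨a, q'⟩
      · simpa using ih []
      · have hb := lq_size_le cs q'.length
        have hstep :
            (if (a :: q').length ≠ 0 then (a :: q').length - 1 else (a :: q').length)
              = q'.length := by simp
        rw [hstep, List.drop_one, List.tail_cons, ih q']
        have hcount : (a :: q').length + (lqL cs).length - cs.foldl letterQueueSize q'.length
            = (q'.length + (lqL cs).length - cs.foldl letterQueueSize q'.length) + 1 := by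
          simp only [List.length_cons]
          omega
        rw [hcount, List.cons_append, List.drop_succ_cons]
    · simp only [if_neg hc]
      have hL : lqL (c :: cs) = lqLast c :: lqL cs := by simp [lqL, hc]
      rw [hL, ih (q ++ [lqLast c])]
      simp only [List.length_append, List.length_cons, List.length_nil, Nat.zero_add, List.append_assoc,
        List.singleton_append]
      congr 1
      omega

-- ===== VERDICT (by name: the statement is the Claim_ definition above) =====
theorem letter_queue_spec : Claim_equal_letter_queue := by
  intro commands _ _
  unfold Spec_letter_queue letter_queue letter_queue_alt
  have := lq_invariant commands []
  simp only [List.nil_append, List.length_nil, Nat.zero_add] at this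
  rw [this]
  rfl
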